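-- pv_equiv track=rewrite | github.com/yunzzo/python_coding_study | 0812/id.py | solution
-- ===== SOURCE A (Python) =====
-- def solution(new_id):
--     #1
--     new_id = new_id.lower()
--     #2
--     trash = '~!@#$%^&*()=+[{]}:?,<>/'
--     new_id = ''.join(x for x in new_id if x not in trash)
--     #3
--     i = 0
--     while(i<(len(new_id)-1)):
--         if new_id[i] == '.':
--             if new_id[i+1] == '.':
--                 new_id = new_id[:i] + new_id[i+1:]
--             else:
--                 i += 1
--         else:
--             i += 1
--     #4
--     if len(new_id) != 1:
--         if new_id[0] == '.':
--             new_id = new_id[1:]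
--         if new_id[-1] == '.':
--             new_id = new_id[:-1]
--     else:
--         if new_id == '.':
--             new_id = ''
--     #5
--     if len(new_id) == 0:
--         new_id = 'a'
--     #6
--     if len(new_id) >=16:
--         if new_id[14] == '.':
--             new_id = new_id[:14]
--         else:
--             new_id = new_id[:15]
--     #7
--     if len(new_id) <= 2:
--         while(len(new_id) < 3):
--             new_id += new_id[-1]
--     answer = new_id
--     return answer
-- ===== SOURCE B (Python) =====
-- TRASH = '~!@#$%^&*()=+[{]}:?,<>/'
--
-- def solution(new_id):
--     # single accumulator pass: lowercase, drop trash, and collapse dot runs at once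
--     out = []
--     for c in new_id.lower():
--         if c in TRASH:
--             continue
--         if c == '.' and out and out[-1] == '.':
--             continue
--         out.append(c)
--     s = ''.join(out).strip('.')
--     if not s:
--         s = 'a'
--     s = s[:15].rstrip('.')
--     if len(s) < 3:
--         s = s + s[-1] * (3 - len(s))
--     return s
-- ===== Notes on version B (the rewrite author's own statement) =====
-- stated objective: faster
-- what changed: A builds the filtered string, then collapses dot runs by repeatedly rebuilding the whole string with slicing inside an index while-loop (quadratic on dot runs); B does lowercase+filter+dot-collapse in one accumulator pass and replaces A's four-branch edge trimming and 15-cut special-casing with strip('.') / rstrip('.') and a replicate padding formula.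
-- crash fix: A raises IndexError (new_id[0] on an empty string) whenever every lowered character of new_id is in the trash set, so the filtered string is empty; B returns 'aaa' there. — e.g. on solution("=)+"): A raises IndexError, B returns "aaa"
import Mathlib
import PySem

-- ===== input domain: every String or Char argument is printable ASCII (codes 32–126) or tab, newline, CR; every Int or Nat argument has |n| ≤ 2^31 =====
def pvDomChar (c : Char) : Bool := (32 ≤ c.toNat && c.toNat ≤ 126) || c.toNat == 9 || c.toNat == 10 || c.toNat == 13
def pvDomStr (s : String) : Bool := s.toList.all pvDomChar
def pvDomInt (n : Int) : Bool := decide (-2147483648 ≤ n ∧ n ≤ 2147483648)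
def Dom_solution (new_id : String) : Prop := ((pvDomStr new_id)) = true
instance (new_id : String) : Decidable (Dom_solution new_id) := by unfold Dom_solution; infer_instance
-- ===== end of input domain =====

-- B replaces A's quadratic slice-rebuilding dot-collapse while-loop with one accumulator pass
-- (filter + collapse together) and strip('.')/rstrip('.')/replicate for the edge steps; return value only.

-- ===== PORT A =====
def pvTrash : List Char := "~!@#$%^&*()=+[{]}:?,<>/".toList

-- step 3: while i < len-1: delete new_id[i] when it and its successor are dots, else i += 1
-- (Python's i is an int but stays ≥ 0; Nat is exact here)
def aLoop (s : List Char) (i : Nat) : List Char :=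
  if i < s.length - 1 then
    if PySem.List.pyGet? s (i : Int) = some '.' then
      if PySem.List.pyGet? s ((i : Int) + 1) = some '.' then
        aLoop (PySem.List.slice s none (some (i : Int)) ++
               PySem.List.slice s (some ((i : Int) + 1)) none) i
      else aLoop s (i + 1)
    else aLoop s (i + 1)
  else s
termination_by s.length - i
decreasing_by
  · have : ((i:Int)+1) = ((i+1 : Nat) : Int) := by push_cast; ring
    simp only [PySem.List.slice_to_natCast, this, PySem.List.slice_from_natCast,
      List.length_append, List.length_take, List.length_drop]
    omega
  · omega
  · omega

-- step 7: while len < 3: new_id += new_id[-1]  (the `none` branch is unreachable: totality guard)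
def aPad (w : List Char) : List Char :=
  if w.length < 3 then
    match h : w.getLast? with
    | some c => aPad (w ++ [c])
    | none => w
  else w
termination_by 3 - w.length

def solution (new_id : String) : String :=
  let s1 := PySem.Chars.lower new_id.toList
  let s2 := s1.filter (fun x => !pvTrash.contains x)   -- ''.join(x for x in new_id if x not in trash)
  let s3 := aLoop s2 0
  let s4 :=
    if s3.length ≠ 1 then
      let t := if PySem.List.pyGet? s3 0 = some '.' then PySem.List.slice s3 (some 1) none else s3
      if PySem.List.pyGet? t (-1) = some '.' then PySem.List.slice t none (some (-1)) else t
    else if s3 = ['.'] then [] else s3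
  let s5 := if s4.length = 0 then ['a'] else s4
  let s6 :=
    if 16 ≤ s5.length then
      if PySem.List.pyGet? s5 14 = some '.' then PySem.List.slice s5 none (some 14)
      else PySem.List.slice s5 none (some 15)
    else s5
  let s7 := if s6.length ≤ 2 then aPad s6 else s6
  String.ofList s7

-- ===== PORT B =====
def pvTrashB : List Char := "~!@#$%^&*()=+[{]}:?,<>/".toList

-- one step of Source B's accumulator loop
def bStep (out : List Char) (c : Char) : List Char :=
  if pvTrashB.contains c then out
  else if c = '.' ∧ out.getLast? = some '.' then out
  else out ++ [c]

-- s.rstrip('.') — hand port, exact: drop the trailing run of dots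
def bRstrip (s : List Char) : List Char := (s.reverse.dropWhile (fun c => c == '.')).reverse

def solution_alt (new_id : String) : String :=
  let out := (PySem.Chars.lower new_id.toList).foldl bStep []
  let s := PySem.Chars.stripChars out ['.']
  let s1 := if s = [] then ['a'] else s
  let s2 := bRstrip (s1.take 15)                       -- s[:15].rstrip('.')
  let s3 := if s2.length < 3 then s2 ++ List.replicate (3 - s2.length) (s2.getLastD 'a') else s2
  String.ofList s3                                         -- s2 is never empty; getLastD default is a totality guard

-- ===== PRECONDITION & SPEC =====
-- Pre_ excludes exactly the inputs where A raises IndexError (new_id[0] after filtering leaves ''):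
-- some lowered character must survive the trash filter.
def Pre_solution (new_id : String) : Prop :=
  new_id.toList.any
    (fun c => !("~!@#$%^&*()=+[{]}:?,<>/".toList.contains (PySem.Chars.lowerChar c))) = true
instance (new_id : String) : Decidable (Pre_solution new_id) := by unfold Pre_solution; infer_instance
def pvWitness_solution : String := "...Bad=ID..abc"

-- A raises IndexError when every lowered character of new_id is in the trash set; B returns "aaa" there.
def Raises_solution (new_id : String) : Prop :=
  new_id.toList.all
    (fun c => "~!@#$%^&*()=+[{]}:?,<>/".toList.contains (PySem.Chars.lowerChar c)) = true
instance (new_id : String) : Decidable (Raises_solution new_id) := by unfold Raises_solution; infer_instance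
def pvRaiseWitness_solution : String := "=)+"
def pvRaiseWitnessOut_solution : String := "aaa"

def Spec_solution (new_id : String) (out : String) : Prop := out = solution_alt new_id
instance (new_id : String) (out : String) : Decidable (Spec_solution new_id out) := by unfold Spec_solution; infer_instance

-- ===== CLAIM (what is proved, stated in full; the proofs are below) =====
def Claim_equal_solution : Prop := ∀ (new_id : String), Dom_solution new_id → Pre_solution new_id → Spec_solution new_id (solution new_id)
def Claim_raises_solution : Prop := (∀ (new_id : String), Dom_solution new_id → Raises_solution new_id → ¬ Pre_solution new_id) ∧ (Dom_solution (pvRaiseWitness_solution) ∧ Raises_solution (pvRaiseWitness_solution) ∧ solution_alt (pvRaiseWitness_solution) = pvRaiseWitnessOut_solution)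

-- ===== LEMMAS AND PROOFS =====

-- no two adjacent dots
def pvR (x y : Char) : Prop := ¬(x = '.' ∧ y = '.')

-- dot-collapse, parametrised by the last kept character
def cP (prev : Option Char) : List Char → List Char
  | [] => []
  | c :: cs => if c = '.' ∧ prev = some '.' then cP prev cs else c :: cP (some c) cs

-- pairwise view of A's while-loop
def cPair : List Char → List Char
  | [] => []
  | [a] => [a]
  | a :: b :: rest => if a = '.' ∧ b = '.' then cPair (b :: rest) else a :: cPair (b :: rest)

theorem foldl_bStep (cs : List Char) (acc : List Char) :
    cs.foldl bStep acc = acc ++ cP acc.getLast? (cs.filter (fun c => !pvTrashB.contains c)) := by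
  induction cs generalizing acc with
  | nil => simp [cP]
  | cons c cs ih =>
    simp only [List.foldl_cons, List.filter_cons]
    by_cases ht : c ∈ pvTrashB
    · simp [bStep, ht, ih]
    · by_cases hd : c = '.' ∧ acc.getLast? = some '.'
      · have hdot : ('.' : Char) ∉ pvTrashB := by decide
        simp [bStep, ht, hd, ih, cP, hd.1, hdot]
      · rw [bStep]
        simp only [List.contains_eq_mem, decide_eq_true_eq, if_neg ht, if_neg hd, ih (acc ++ [c])]
        simp [cP, hd, ht]

theorem cPair_cons (l : List Char) (a : Char) : cPair (a :: l) = a :: cP (some a) l := by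
  induction l generalizing a with
  | nil => simp [cPair, cP]
  | cons b rest ih =>
    by_cases h : a = '.' ∧ b = '.'
    · obtain ⟨ha, hb⟩ := h; subst ha; subst hb
      rw [show cPair ('.' :: '.' :: rest) = cPair ('.' :: rest) from by simp [cPair], ih]
      simp [cP]
    · have h' : ¬ (b = '.' ∧ (some a : Option Char) = some '.') := by
        simp only [Option.some.injEq]; tauto
      simp only [cPair, if_neg h, ih b, cP, if_neg h']

theorem cPair_eq_cP (l : List Char) : cPair l = cP none l := by
  cases l with
  | nil => rfl
  | cons a l => rw [cPair_cons]; simp [cP]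

theorem aLoop_eq (suf pre : List Char) : aLoop (pre ++ suf) pre.length = pre ++ cPair suf := by
  induction suf using cPair.induct generalizing pre with
  | case1 =>
    rw [aLoop]
    simp [cPair]
  | case2 a =>
    rw [aLoop]
    simp [cPair]
  | case3 a b rest h ih =>
    obtain ⟨ha, hb⟩ := h; subst ha; subst hb
    have hget1 : PySem.List.pyGet? (pre ++ '.' :: '.' :: rest) (pre.length : Int) = some '.' := by
      rw [PySem.List.pyGet?_natCast]
      simp
    have hcast : ((pre.length : Int) + 1) = ((pre.length + 1 : Nat) : Int) := by push_cast; ring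
    have hget2 : PySem.List.pyGet? (pre ++ '.' :: '.' :: rest) ((pre.length : Int) + 1) = some '.' := by
      rw [hcast, PySem.List.pyGet?_natCast]
      rw [List.getElem?_append_right (by omega)]
      simp
    rw [aLoop, if_pos (by simp), hget1, if_pos rfl, hget2, if_pos rfl]
    have hsl : PySem.List.slice (pre ++ '.' :: '.' :: rest) none (some (pre.length : Int)) ++
        PySem.List.slice (pre ++ '.' :: '.' :: rest) (some ((pre.length : Int) + 1)) none
        = pre ++ '.' :: rest := by
      rw [PySem.List.slice_to_natCast, hcast, PySem.List.slice_from_natCast]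
      rw [List.take_left' rfl]
      have hd : List.drop (pre.length + 1) (pre ++ '.' :: '.' :: rest) = List.drop 1 ('.' :: '.' :: rest) :=
        List.drop_length_add_append 1
      rw [hd]
      simp
    rw [hsl, ih pre]
    simp [cPair]
  | case4 a b rest h ih =>
    have hget1 : PySem.List.pyGet? (pre ++ a :: b :: rest) (pre.length : Int) = some a := by
      rw [PySem.List.pyGet?_natCast]
      simp
    have hcast : ((pre.length : Int) + 1) = ((pre.length + 1 : Nat) : Int) := by push_cast; ring
    have hget2 : PySem.List.pyGet? (pre ++ a :: b :: rest) ((pre.length : Int) + 1) = some b := by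
      rw [hcast, PySem.List.pyGet?_natCast]
      rw [List.getElem?_append_right (by omega)]
      simp
    rw [aLoop, if_pos (by simp), hget1, hget2]
    have hbranch : aLoop (pre ++ a :: b :: rest) (pre.length + 1) = pre ++ a :: cPair (b :: rest) := by
      have := ih (pre ++ [a])
      simpa using this
    have hcp : cPair (a :: b :: rest) = a :: cPair (b :: rest) := by
      rw [cPair, if_neg h]
    rcases Classical.em (a = '.') with ha | ha
    · rw [if_pos (by simp [ha]), if_neg (by subst ha; simp; tauto), hbranch, hcp]
    · rw [if_neg (by simp [ha]), hbranch, hcp]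

theorem chain_cP (l : List Char) (a : Char) : List.IsChain pvR (a :: cP (some a) l) := by
  induction l generalizing a with
  | nil => exact List.IsChain.singleton a
  | cons c l ih =>
    by_cases h : c = '.' ∧ (some a : Option Char) = some '.'
    · rw [cP, if_pos h]
      obtain ⟨h1, h2⟩ := h
      simp only [Option.some.injEq] at h2
      subst h1; subst h2
      exact ih '.'
    · rw [cP, if_neg h]
      refine List.IsChain.cons_cons ?_ (ih c)
      simp only [Option.some.injEq] at h
      intro ⟨h1, h2⟩
      exact h ⟨h2, h1⟩

theorem chain_cP_none (l : List Char) : List.IsChain pvR (cP none l) := by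
  cases l with
  | nil => exact List.IsChain.nil
  | cons a l =>
    rw [cP, if_neg (by simp)]
    exact chain_cP l a

theorem dropWhile_of_head (l : List Char) (h : ∀ a, l.head? = some a → a ≠ '.') :
    l.dropWhile (fun c => c == '.') = l := by
  cases l with
  | nil => rfl
  | cons x xs => simp [h x rfl]

theorem dropWhile_chain (t : List Char) (h : List.IsChain pvR t) :
    t.dropWhile (fun c => c == '.') = if t.head? = some '.' then t.tail else t := by
  cases t with
  | nil => simp
  | cons x xs =>
    by_cases hx : x = '.'
    · subst hx
      simp only [List.head?_cons, if_pos rfl, List.tail_cons, List.dropWhile_cons, beq_self_eq_true,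
        if_pos trivial]
      apply dropWhile_of_head
      intro a ha hdot
      subst hdot
      cases xs with
      | nil => simp at ha
      | cons y ys =>
        simp only [List.head?_cons, Option.some.injEq] at ha
        rcases List.isChain_cons_cons.mp h with ⟨hr, _⟩
        exact hr ⟨rfl, ha⟩
    · simp [hx]

theorem chain_rev (t : List Char) (h : List.IsChain pvR t) : List.IsChain pvR t.reverse := by
  rw [List.isChain_reverse]
  exact h.imp fun {a b} hxy ⟨h1, h2⟩ => hxy ⟨h2, h1⟩

theorem bRstrip_chain (v : List Char) (h : List.IsChain pvR v) :
    bRstrip v = if v.getLast? = some '.' then v.dropLast else v := by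
  rw [bRstrip, dropWhile_chain v.reverse (chain_rev v h), List.head?_reverse]
  by_cases hl : v.getLast? = some '.'
  · rw [if_pos hl, if_pos hl, List.tail_reverse, List.reverse_reverse]
  · rw [if_neg hl, if_neg hl, List.reverse_reverse]

theorem pdot_eq : (fun c : Char => c == '.') = (fun c : Char => decide (c = '.')) := by
  funext c; exact Bool.beq_eq_decide_eq c '.'

theorem stripChars_eq (t : List Char) :
    PySem.Chars.stripChars t ['.'] = bRstrip (t.dropWhile (fun c => c == '.')) := by
  simp [PySem.Chars.stripChars, List.contains_eq_mem, bRstrip, pdot_eq]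

theorem pyGet?_neg_one (u : List Char) : PySem.List.pyGet? u (-1) = u.getLast? := by
  cases u with
  | nil => rfl
  | cons x xs => simp [PySem.List.pyGet?, PySem.List.pyIdx?, List.getLast?_eq_getElem?]

theorem step4_eq (t : List Char) (h : List.IsChain pvR t) :
    (if t.length ≠ 1 then
      (let u := if PySem.List.pyGet? t 0 = some '.' then PySem.List.slice t (some 1) none else t
       if PySem.List.pyGet? u (-1) = some '.' then PySem.List.slice u none (some (-1)) else u)
    else if t = ['.'] then [] else t) = PySem.Chars.stripChars t ['.'] := by
  rw [stripChars_eq]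
  match t with
  | [] => decide
  | [a] =>
    by_cases ha : a = '.'
    · subst ha; simp [bRstrip]
    · simp only [List.length_cons, List.length_nil, ne_eq, Nat.zero_add]
      rw [if_neg (by simp), if_neg (by simpa using ha)]
      simp [bRstrip, ha]
  | x :: y :: l =>
    have hlen : ¬ (x :: y :: l).length = 1 := by simp
    rw [if_pos hlen]
    have hu : (if PySem.List.pyGet? (x :: y :: l) 0 = some '.' then
          PySem.List.slice (x :: y :: l) (some 1) none else (x :: y :: l))
        = (x :: y :: l).dropWhile (fun c => c == '.') := by
      rw [dropWhile_chain _ h]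
      have h0 : PySem.List.pyGet? (x :: y :: l) 0 = some x := by
        have := PySem.List.pyGet?_natCast (x :: y :: l) 0
        simpa using this
      rw [h0, PySem.List.slice_from_one]
      simp [List.head?_cons]
    simp only [hu]
    set u := (x :: y :: l).dropWhile (fun c => c == '.') with hudef
    have hchain : List.IsChain pvR u := by
      rw [hudef, dropWhile_chain _ h]
      split
      · exact h.tail
      · exact h
    rw [pyGet?_neg_one, PySem.List.slice_to_neg_one, ← bRstrip_chain u hchain]

theorem bRstrip_getLast (w : List Char) : (bRstrip w).getLast? ≠ some '.' := by
  rw [bRstrip, List.getLast?_reverse]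
  intro hsome
  have := List.head?_dropWhile_not (fun c => c == '.') w.reverse
  rw [hsome] at this
  simp at this

theorem strip_chain (t : List Char) (h : List.IsChain pvR t) :
    List.IsChain pvR (PySem.Chars.stripChars t ['.']) := by
  rw [stripChars_eq]
  have hd : List.IsChain pvR (t.dropWhile (fun c => c == '.')) := by
    rw [dropWhile_chain _ h]; split
    · exact h.tail
    · exact h
  rw [bRstrip_chain _ hd]
  split
  · rw [List.dropLast_eq_take]
    exact hd.take _
  · exact hd

theorem strip_getLast (t : List Char) :
    (PySem.Chars.stripChars t ['.']).getLast? ≠ some '.' := by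
  rw [stripChars_eq]
  exact bRstrip_getLast _

theorem step6_eq (u : List Char) (h : List.IsChain pvR u) (hl : u.getLast? ≠ some '.') :
    (if 16 ≤ u.length then
      (if PySem.List.pyGet? u 14 = some '.' then PySem.List.slice u none (some 14)
       else PySem.List.slice u none (some 15))
     else u) = bRstrip (u.take 15) := by
  by_cases h16 : 16 ≤ u.length
  · rw [if_pos h16]
    have hchain : List.IsChain pvR (u.take 15) := h.take 15
    rw [bRstrip_chain _ hchain]
    have hget : (u.take 15).getLast? = u[14]? := by
      rw [List.getLast?_eq_getElem?]
      have hlen : (List.take 15 u).length = 15 := by rw [List.length_take]; omega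
      rw [hlen, List.getElem?_take, if_pos (by norm_num)]
    have hpy : PySem.List.pyGet? u 14 = u[14]? := by
      have := PySem.List.pyGet?_natCast u 14
      simpa using this
    have hs14 : PySem.List.slice u none (some 14) = u.take 14 := by
      rw [PySem.List.slice_to _ (by norm_num)]
      simp
    have hs15 : PySem.List.slice u none (some 15) = u.take 15 := by
      rw [PySem.List.slice_to _ (by norm_num)]
      simp
    have hdl : (u.take 15).dropLast = u.take 14 := List.dropLast_take (by omega)
    rw [hget, hpy, hs14, hs15, hdl]
  · rw [if_neg h16]
    rw [List.take_of_length_le (by omega)]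
    rw [bRstrip_chain _ h, if_neg hl]

theorem step7_eq (w : List Char) (hne : w ≠ []) :
    (if w.length ≤ 2 then aPad w else w) =
    (if w.length < 3 then w ++ List.replicate (3 - w.length) (w.getLastD 'a') else w) := by
  match w with
  | [] => exact absurd rfl hne
  | [x] =>
    have e1 : aPad [x] = aPad [x, x] := by rw [aPad]; norm_num; split <;> simp_all
    have e2 : aPad [x, x] = aPad [x, x, x] := by rw [aPad]; norm_num; split <;> simp_all
    have e3 : aPad [x, x, x] = [x, x, x] := by rw [aPad]; norm_num
    simp [e1, e2, e3, List.replicate]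
  | [x, y] =>
    have e1 : aPad [x, y] = aPad [x, y, y] := by rw [aPad]; norm_num; split <;> simp_all
    have e2 : aPad [x, y, y] = [x, y, y] := by rw [aPad]; norm_num
    simp [e1, e2, List.replicate]
  | x :: y :: z :: t =>
    rw [if_neg (by simp), if_neg (by simp)]

-- ===== VERDICT (by name: the statement is the Claim_ definition above) =====
set_option maxHeartbeats 1000000 in
theorem solution_spec : Claim_equal_solution := by
  intro s _ _
  unfold Spec_solution solution solution_alt
  dsimp only
  congr 1
  rw [foldl_bStep]
  rw [show pvTrashB = pvTrash from rfl]
  simp only [List.nil_append, List.getLast?_nil]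
  set F := List.filter (fun x => !pvTrash.contains x) (PySem.Chars.lower s.toList) with hFdef
  have h3 : aLoop F 0 = cP none F := by
    have := aLoop_eq F []
    simpa [cPair_eq_cP] using this
  rw [h3]
  set C := cP none F with hCdef
  have hCchain : List.IsChain pvR C := chain_cP_none F
  rw [step4_eq C hCchain]
  set S := PySem.Chars.stripChars C ['.'] with hSdef
  simp only [List.length_eq_zero_iff]
  set U := if S = [] then ['a'] else S with hUdef
  have hUchain : List.IsChain pvR U := by
    rw [hUdef]; split
    · exact List.IsChain.singleton 'a'
    · exact strip_chain C hCchain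
  have hUlast : U.getLast? ≠ some '.' := by
    rw [hUdef]; split
    · decide
    · exact strip_getLast C
  have hUne : U ≠ [] := by
    rw [hUdef]; split
    · simp
    · assumption
  rw [step6_eq U hUchain hUlast]
  set W := bRstrip (U.take 15) with hWdef
  have hWne : W ≠ [] := by
    rw [hWdef, ← step6_eq U hUchain hUlast]
    by_cases h16 : 16 ≤ U.length
    · rw [if_pos h16]
      split
      · rw [PySem.List.slice_to _ (by norm_num)]
        simp [List.take_eq_nil_iff, hUne]
      · rw [PySem.List.slice_to _ (by norm_num)]
        simp [List.take_eq_nil_iff, hUne]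
    · rw [if_neg h16]
      exact hUne
  rw [step7_eq W hWne]

@[simp]
theorem solution_raises : Claim_raises_solution := by
  unfold Claim_raises_solution
  constructor
  · intro s _ hr hp
    unfold Raises_solution at hr
    unfold Pre_solution at hp
    simp only [List.any_eq_true, List.all_eq_true] at hr hp
    obtain ⟨c, hc, hb⟩ := hp
    have := hr c hc
    simp_all
  · exact ⟨by decide, by decide, by decide⟩
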